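-- pv_equiv track=rewrite | github.com/nusu-github/DCNv4 | dcnv4/functions/flash_deform_attn_func.py | findspec
-- ===== SOURCE A (Python) =====
-- def factors(N):
--     """Compute all factors of N for kernel configuration."""
--     res = []
--     for i in range(1, N + 1):
--         if N % i == 0:
--             res.append(i)
--     return res
--
-- def findspec(B, Q, G, C):
--     """Find optimal kernel configuration for forward pass.
--
--     Args:
--         B: Batch size.
--         Q: Number of queries.
--         G: Number of attention heads (groups).
--         C: Channels per head.
--
--     Returns:
--         Tuple of (d_stride, n_thread) for kernel launch.
--
--     """
--     d_stride = 8
--     ms = factors(B * Q)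
--     multiplier = 1
--     for m in ms:
--         if m <= 64 and (m * G * C // d_stride) <= 512:
--             multiplier = m
--     n_thread = multiplier * G * C // d_stride
--     return d_stride, n_thread
-- ===== SOURCE B (Python) =====
-- def findspec(B, Q, G, C):
--     """Find optimal kernel configuration for forward pass.
--
--     Same result as the original: multiplier is the largest divisor m of B*Q
--     with m <= 64 and m*G*C//8 <= 512 (1 if none), found by scanning the at
--     most 64 candidates downward instead of enumerating all B*Q factors.
--     """
--     d_stride = 8
--     N = B * Q
--     multiplier = 1
--     if N > 0:
--         multiplier = next(
--             (m for m in range(min(64, N), 0, -1)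
--              if N % m == 0 and m * G * C // d_stride <= 512),
--             1,
--         )
--     n_thread = multiplier * G * C // d_stride
--     return d_stride, n_thread
-- ===== Notes on version B (the rewrite author's own statement) =====
-- stated objective: faster
-- what changed: Instead of enumerating every factor of B*Q and keeping the last admissible one, B scans the at most 64 candidate divisors downward from min(64, B*Q) and takes the first one dividing B*Q that satisfies the thread bound.
import Mathlib
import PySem

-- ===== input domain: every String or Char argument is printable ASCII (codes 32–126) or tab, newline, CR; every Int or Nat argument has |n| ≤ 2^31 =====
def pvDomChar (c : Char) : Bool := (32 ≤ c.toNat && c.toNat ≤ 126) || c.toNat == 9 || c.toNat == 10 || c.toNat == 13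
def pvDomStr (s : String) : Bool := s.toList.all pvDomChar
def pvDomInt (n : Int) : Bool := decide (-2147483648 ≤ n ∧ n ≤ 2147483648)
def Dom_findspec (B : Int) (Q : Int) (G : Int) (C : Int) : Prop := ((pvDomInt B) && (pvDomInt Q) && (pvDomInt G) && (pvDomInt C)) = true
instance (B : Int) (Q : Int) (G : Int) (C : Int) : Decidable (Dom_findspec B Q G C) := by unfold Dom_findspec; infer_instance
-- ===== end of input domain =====

-- B finds the multiplier by trial division over the ≤ 64 candidates, downward,
-- instead of enumerating all factors of B*Q; same return value everywhere.

-- ===== PORT A =====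
def factorsA (N : Int) : List Int :=
  (PySem.List.pyRange 1 (N + 1) 1).foldl
    (fun res i => if PySem.Int.mod N i = 0 then res ++ [i] else res) []

def findspec (B : Int) (Q : Int) (G : Int) (C : Int) : List Int :=
  let d_stride : Int := 8
  let ms := factorsA (B * Q)
  let multiplier := ms.foldl
    (fun multiplier m =>
      if m ≤ 64 ∧ PySem.Int.floordiv (m * G * C) d_stride ≤ 512 then m else multiplier) 1
  let n_thread := PySem.Int.floordiv (multiplier * G * C) d_stride
  [d_stride, n_thread]

-- ===== PORT B =====
def findspec_alt (B : Int) (Q : Int) (G : Int) (C : Int) : List Int :=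
  let d_stride : Int := 8
  let N := B * Q
  let multiplier :=
    if 0 < N then
      ((PySem.List.pyRange (min 64 N) 0 (-1)).find?
          (fun m => decide (PySem.Int.mod N m = 0 ∧
            PySem.Int.floordiv (m * G * C) d_stride ≤ 512))).getD 1
    else 1
  let n_thread := PySem.Int.floordiv (multiplier * G * C) d_stride
  [d_stride, n_thread]

-- ===== PRECONDITION & SPEC =====
def Spec_findspec (B : Int) (Q : Int) (G : Int) (C : Int) (out : List Int) : Prop := out = findspec_alt B Q G C
instance (B : Int) (Q : Int) (G : Int) (C : Int) (out : List Int) : Decidable (Spec_findspec B Q G C out) := by unfold Spec_findspec; infer_instance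

-- ===== CLAIM (what is proved, stated in full; the proofs are below) =====
def Claim_equal_findspec : Prop := ∀ (B : Int) (Q : Int) (G : Int) (C : Int), Dom_findspec B Q G C → Spec_findspec B Q G C (findspec B Q G C)

-- ===== LEMMAS AND PROOFS =====

-- the append-accumulator loop of factorsA is a filter
theorem factorsA_eq_filter (N : Int) :
    factorsA N = (PySem.List.pyRange 1 (N + 1) 1).filter (fun i => decide (PySem.Int.mod N i = 0)) := by
  unfold factorsA
  have hfun : (fun (res : List Int) i => if PySem.Int.mod N i = 0 then res ++ [i] else res)
      = (fun res i => if decide (PySem.Int.mod N i = 0) = true then res ++ [i] else res) := by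
    funext res i; simp
  rw [hfun, PySem.List.foldl_append_if]
  simp

-- "keep the last element satisfying p" fold returns the last match (default a0)
theorem foldl_last_if (p : Int → Prop) [DecidablePred p] :
    ∀ (l : List Int) (a0 : Int),
      l.foldl (fun a m => if p m then m else a) a0
        = ((l.filter (fun m => decide (p m))).getLast?).getD a0 := by
  intro l
  induction l with
  | nil => intro a0; simp
  | cons x l ih =>
      intro a0
      rw [List.foldl_cons, ih]
      by_cases h : p x
      · rw [if_pos h, List.filter_cons_of_pos (by simpa using h), List.getLast?_cons]
        simp
      · rw [if_neg h, List.filter_cons_of_neg (by simpa using h)]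

-- the two multiplier computations agree
theorem mult_eq (N G C : Int) :
    (factorsA N).foldl
        (fun multiplier m =>
          if m ≤ 64 ∧ PySem.Int.floordiv (m * G * C) 8 ≤ 512 then m else multiplier) 1
      = (if 0 < N then
          ((PySem.List.pyRange (min 64 N) 0 (-1)).find?
              (fun m => decide (PySem.Int.mod N m = 0 ∧
                PySem.Int.floordiv (m * G * C) 8 ≤ 512))).getD 1
        else 1) := by
  rw [factorsA_eq_filter,
      foldl_last_if (fun m => m ≤ 64 ∧ PySem.Int.floordiv (m * G * C) 8 ≤ 512)]
  by_cases hN : 0 < N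
  · rw [if_pos hN, PySem.List.pyRange_neg_one_eq_reverse]
    rw [← List.head?_filter, List.filter_reverse, List.head?_reverse]
    rw [List.filter_filter]
    simp only [zero_add]
    congr 2
    rw [PySem.List.pyRange_one_append 1 (min 64 N + 1) (N + 1) (by omega) (by omega),
        List.filter_append]
    have hup : (PySem.List.pyRange (min 64 N + 1) (N + 1) 1).filter
        (fun a => decide (a ≤ 64 ∧ PySem.Int.floordiv (a * G * C) 8 ≤ 512) &&
          decide (PySem.Int.mod N a = 0)) = [] := by
      apply List.filter_eq_nil_iff.mpr
      intro x hx
      rw [PySem.List.mem_pyRange_one] at hx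
      have hx64 : ¬ (x ≤ 64) := by omega
      simp [hx64]
    rw [hup, List.append_nil]
    apply List.filter_congr
    intro x hx
    rw [PySem.List.mem_pyRange_one] at hx
    have hx64 : x ≤ 64 := by omega
    simp [hx64, Bool.and_comm]
  · rw [if_neg hN]
    rw [PySem.List.pyRange_one_eq_nil (by omega)]
    simp

-- ===== VERDICT (by name: the statement is the Claim_ definition above) =====
theorem findspec_spec : Claim_equal_findspec := by
  intro B Q G C _
  unfold Spec_findspec findspec findspec_alt
  simp only [mult_eq (B * Q) G C]
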